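-- pv_equiv track=rewrite | github.com/PiergiorgioMassa/abft_load | rxy_from_vcf.py | choose_ann_entry
-- ===== SOURCE A (Python) =====
-- IMPACT_RANK = {"HIGH": 3, "MODERATE": 2, "LOW": 1, "MODIFIER": 0}
--
-- def split_ann_entry(entry):
--     parts = entry.split('|')
--     if len(parts) < 3:
--         parts += [""]*(3-len(parts))
--     annotation = parts[1] if len(parts) > 1 else ""
--     impact     = parts[2] if len(parts) > 2 else ""
--     trailing   = parts[-1] if parts else ""
--     return annotation, impact, trailing
--
-- def choose_ann_entry(ann_list, mode):
--     if not ann_list: return None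
--     anns = list(ann_list)
--     if mode == "first":
--         return anns[0]
--     elif mode == "canonical":
--         for e in anns:
--             ann, imp, tail = split_ann_entry(e)
--             if "CANONICAL" in tail:
--                 return e
--         return anns[0]
--     elif mode == "worst":
--         for e in anns:
--             ann, imp, tail = split_ann_entry(e)
--             if ann == "intergenic_region":
--                 return e
--         best_e, best_rank = None, -1
--         for e in anns:
--             ann, imp, tail = split_ann_entry(e)
--             rank = IMPACT_RANK.get(imp, -1)
--             if rank > best_rank:
--                 best_e, best_rank = e, rank
--         return best_e
--     else:
--         return None
-- ===== SOURCE B (Python) =====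
-- IMPACT_RANK = {"HIGH": 3, "MODERATE": 2, "LOW": 1, "MODIFIER": 0}
--
--
-- def _fields(e):
--     p = e.split('|')
--     ann = p[1] if len(p) > 1 else ""
--     imp = p[2] if len(p) > 2 else ""
--     tail = p[-1] if len(p) > 2 else ""
--     return ann, imp, tail
--
--
-- def _worst_key(e):
--     ann, imp, _ = _fields(e)
--     return 4 if ann == "intergenic_region" else IMPACT_RANK.get(imp, -1)
--
--
-- def choose_ann_entry(ann_list, mode):
--     anns = list(ann_list)
--     if not anns:
--         return None
--     if mode == "first":
--         return anns[0]
--     if mode == "canonical":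
--         return next((e for e in anns if "CANONICAL" in _fields(e)[2]), anns[0])
--     if mode == "worst":
--         best = max(anns, key=_worst_key)
--         return best if _worst_key(best) >= 0 else None
--     return None
-- ===== Notes on version B (the rewrite author's own statement) =====
-- stated objective: simpler
-- what changed: The worst-mode branch's two sequential scans (first-intergenic scan, then a best-rank accumulator loop) are replaced by a single max-by-priority-key pass where intergenic entries score 4 (above any impact rank) and a final non-candidate check yields None when the best key is -1; the canonical branch becomes a next(...) over a generator.
import Mathlib
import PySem

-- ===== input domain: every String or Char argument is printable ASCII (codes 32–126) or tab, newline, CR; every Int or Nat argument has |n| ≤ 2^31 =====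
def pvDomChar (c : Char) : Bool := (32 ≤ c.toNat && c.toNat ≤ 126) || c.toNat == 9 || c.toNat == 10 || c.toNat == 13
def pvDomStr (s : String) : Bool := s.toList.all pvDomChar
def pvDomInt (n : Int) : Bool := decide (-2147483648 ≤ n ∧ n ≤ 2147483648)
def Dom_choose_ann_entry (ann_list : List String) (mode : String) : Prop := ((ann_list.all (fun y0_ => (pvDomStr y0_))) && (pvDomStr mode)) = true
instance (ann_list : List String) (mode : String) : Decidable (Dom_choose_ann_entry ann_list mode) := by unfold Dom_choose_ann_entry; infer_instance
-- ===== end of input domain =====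

-- B replaces A's two sequential worst-mode scans by a single max-by-priority-key pass (objective: simpler).

-- shared module constant (IMPACT_RANK) and built-in str.split('|') (sep ≠ "", so split? is always some; getD [] only unwraps)
def IMPACT_RANK : PySem.Dict String Int :=
  PySem.Dict.ofList [("HIGH", 3), ("MODERATE", 2), ("LOW", 1), ("MODIFIER", 0)]

def pySplitBar (s : String) : List String := (PySem.Str.split? s "|").getD []

-- ===== PORT A =====
def split_ann_entry (entry : String) : String × String × String :=
  let parts0 := pySplitBar entry
  let parts := if parts0.length < 3 then parts0 ++ List.replicate (3 - parts0.length) "" else parts0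
  let annotation := if parts.length > 1 then PySem.List.pyGetD parts 1 "" else ""
  let impact := if parts.length > 2 then PySem.List.pyGetD parts 2 "" else ""
  let trailing := if !parts.isEmpty then PySem.List.pyGetD parts (-1) "" else ""
  (annotation, impact, trailing)

-- the 'canonical' for-loop with its early return
def chooseCanonicalA : List String → Option String
  | [] => none
  | e :: rest =>
    if PySem.Str.isIn "CANONICAL" (split_ann_entry e).2.2 then some e else chooseCanonicalA rest

-- the first 'worst' loop: early return of the first intergenic entry
def findIntergenicA : List String → Option String
  | [] => none
  | e :: rest =>
    if (split_ann_entry e).1 == "intergenic_region" then some e else findIntergenicA rest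

-- the second 'worst' loop: the (best_e, best_rank) accumulator
def worstStepA (acc : Option String × Int) (e : String) : Option String × Int :=
  let rank := PySem.Dict.getD IMPACT_RANK (split_ann_entry e).2.1 (-1)
  if rank > acc.2 then (some e, rank) else acc

def choose_ann_entry (ann_list : List String) (mode : String) : Option String :=
  if ann_list.isEmpty then none
  else
    let anns := ann_list
    if mode == "first" then some (PySem.List.pyGetD anns 0 "")
    else if mode == "canonical" then
      match chooseCanonicalA anns with
      | some e => some e
      | none => some (PySem.List.pyGetD anns 0 "")
    else if mode == "worst" then
      match findIntergenicA anns with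
      | some e => some e
      | none => (anns.foldl worstStepA (none, -1)).1
    else none

-- ===== PORT B =====
def fieldsB (e : String) : String × String × String :=
  let p := pySplitBar e
  (if p.length > 1 then PySem.List.pyGetD p 1 "" else "",
   if p.length > 2 then PySem.List.pyGetD p 2 "" else "",
   if p.length > 2 then PySem.List.pyGetD p (-1) "" else "")

def worstKey (e : String) : Int :=
  if (fieldsB e).1 == "intergenic_region" then 4
  else PySem.Dict.getD IMPACT_RANK (fieldsB e).2.1 (-1)

-- Python's max(xs, key=k): fold keeping the first maximal element
def pickMax (key : String → Int) : List String → String → String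
  | [], b => b
  | x :: xs, b => pickMax key xs (if key x > key b then x else b)

def choose_ann_entry_alt (ann_list : List String) (mode : String) : Option String :=
  match ann_list with
  | [] => none
  | a :: rest =>
    if mode == "first" then some a
    else if mode == "canonical" then
      some (((a :: rest).find? (fun e => PySem.Str.isIn "CANONICAL" (fieldsB e).2.2)).getD a)
    else if mode == "worst" then
      let best := pickMax worstKey rest a
      if 0 ≤ worstKey best then some best else none
    else none

-- ===== PRECONDITION & SPEC =====
def Spec_choose_ann_entry (ann_list : List String) (mode : String) (out : Option String) : Prop := out = choose_ann_entry_alt ann_list mode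
instance (ann_list : List String) (mode : String) (out : Option String) : Decidable (Spec_choose_ann_entry ann_list mode out) := by unfold Spec_choose_ann_entry; infer_instance

-- ===== CLAIM (what is proved, stated in full; the proofs are below) =====
def Claim_equal_choose_ann_entry : Prop := ∀ (ann_list : List String) (mode : String), Dom_choose_ann_entry ann_list mode → Spec_choose_ann_entry ann_list mode (choose_ann_entry ann_list mode)

-- ===== LEMMAS AND PROOFS =====

theorem fields_eq (e : String) : split_ann_entry e = fieldsB e := by
  unfold split_ann_entry fieldsB
  rcases pySplitBar e with _ | ⟨a, _ | ⟨b, _ | ⟨c, rest⟩⟩⟩ <;>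
    simp [PySem.List.pyGetD, PySem.List.pyGet?, PySem.List.pyIdx?]

theorem rank_cases (s : String) :
    PySem.Dict.getD IMPACT_RANK s (-1) = 3 ∨ PySem.Dict.getD IMPACT_RANK s (-1) = 2 ∨
    PySem.Dict.getD IMPACT_RANK s (-1) = 1 ∨ PySem.Dict.getD IMPACT_RANK s (-1) = 0 ∨
    PySem.Dict.getD IMPACT_RANK s (-1) = -1 := by
  unfold IMPACT_RANK
  rw [PySem.Dict.getD_eq_get?_getD]
  simp only [PySem.Dict.ofList, PySem.Dict.update, PySem.Dict.empty, List.foldl_cons, List.foldl_nil]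
  rw [PySem.Dict.get?_insert, PySem.Dict.get?_insert, PySem.Dict.get?_insert, PySem.Dict.get?_insert]
  split_ifs <;> simp [PySem.Dict.get?]

theorem key_le_four (e : String) : worstKey e ≤ 4 := by
  unfold worstKey; split
  · omega
  · rcases rank_cases (fieldsB e).2.1 with h | h | h | h | h <;> omega

theorem neg_one_le_key (e : String) : -1 ≤ worstKey e := by
  unfold worstKey; split
  · omega
  · rcases rank_cases (fieldsB e).2.1 with h | h | h | h | h <;> omega

theorem key_eq_four_iff (e : String) :
    worstKey e = 4 ↔ ((fieldsB e).1 == "intergenic_region") = true := by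
  unfold worstKey
  constructor
  · intro h; by_contra hc
    simp only [hc, if_false] at h
    rcases rank_cases (fieldsB e).2.1 with h' | h' | h' | h' | h' <;> omega
  · intro h; simp [h]

theorem rank_eq_key (e : String) (h : worstKey e ≠ 4) :
    PySem.Dict.getD IMPACT_RANK (fieldsB e).2.1 (-1) = worstKey e := by
  unfold worstKey at *
  split at h
  · omega
  · rename_i hc; simp [hc]

theorem pickMax_of_four (l : List String) (b : String) (hb : worstKey b = 4) :
    pickMax worstKey l b = b := by
  induction l with
  | nil => rfl
  | cons x xs ih =>
    have := key_le_four x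
    simp only [pickMax]
    have hx : ¬ worstKey x > worstKey b := by omega
    simp only [hx, if_false]
    exact ih

theorem canonical_eq (l : List String) :
    chooseCanonicalA l = l.find? (fun e => PySem.Str.isIn "CANONICAL" (fieldsB e).2.2) := by
  induction l with
  | nil => rfl
  | cons x xs ih =>
    simp only [chooseCanonicalA, fields_eq, List.find?]
    cases h : PySem.Str.isIn "CANONICAL" (fieldsB x).2.2 <;> simp [ih]

theorem worst_loop (l : List String) (b : String) (hb : worstKey b ≠ 4) :
    (match findIntergenicA l with
     | some e => some e
     | none => (l.foldl worstStepA ((if 0 ≤ worstKey b then some b else none), worstKey b)).1)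
    = (if 0 ≤ worstKey (pickMax worstKey l b) then some (pickMax worstKey l b) else none) := by
  induction l generalizing b with
  | nil => simp [findIntergenicA, pickMax]
  | cons x xs ih =>
    by_cases hx : worstKey x = 4
    · have hxi : ((fieldsB x).1 == "intergenic_region") = true := (key_eq_four_iff x).1 hx
      have hFI : findIntergenicA (x :: xs) = some x := by
        simp only [findIntergenicA, fields_eq, hxi, if_true]
      rw [hFI]
      simp only [pickMax]
      have hgt : worstKey x > worstKey b := by
        have := key_le_four b; omega
      simp only [hgt, if_pos]
      rw [pickMax_of_four xs x hx]
      simp [hx]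
    · have hxi : ((fieldsB x).1 == "intergenic_region") = false := by
        cases h : ((fieldsB x).1 == "intergenic_region")
        · rfl
        · exact absurd ((key_eq_four_iff x).2 h) hx
      have hFI : findIntergenicA (x :: xs) = findIntergenicA xs := by
        simp only [findIntergenicA, fields_eq, hxi, Bool.false_eq_true, if_false]
      rw [hFI]
      have hrank : worstStepA ((if 0 ≤ worstKey b then some b else none), worstKey b) x
          = (if worstKey x > worstKey b then ((if 0 ≤ worstKey x then some x else none), worstKey x)
             else ((if 0 ≤ worstKey b then some b else none), worstKey b)) := by
        unfold worstStepA
        rw [fields_eq, rank_eq_key x hx]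
        by_cases hgt : worstKey x > worstKey b
        · have hx0 : 0 ≤ worstKey x := by have := neg_one_le_key b; omega
          simp [hgt, hx0]
        · simp [hgt]
      simp only [List.foldl_cons, pickMax, hrank]
      by_cases hgt : worstKey x > worstKey b
      · simp only [hgt, if_pos]
        exact ih x hx
      · simp only [hgt, if_false]
        exact ih b hb

-- ===== VERDICT (by name: the statement is the Claim_ definition above) =====
theorem choose_ann_entry_spec : Claim_equal_choose_ann_entry := by
  intro ann_list mode _
  unfold Spec_choose_ann_entry choose_ann_entry choose_ann_entry_alt
  rcases ann_list with _ | ⟨a, rest⟩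
  · simp
  · have hget : PySem.List.pyGetD (a :: rest) 0 "" = a := by
      simp [PySem.List.pyGetD, PySem.List.pyGet?, PySem.List.pyIdx?]
    simp only [List.isEmpty_cons, Bool.false_eq_true, if_false]
    by_cases h1 : (mode == "first") = true
    · simp only [h1, if_true, hget]
    · simp only [h1, Bool.false_eq_true, if_false]
      by_cases h2 : (mode == "canonical") = true
      · simp only [h2, if_true]
        rw [canonical_eq]
        rcases hf : (a :: rest).find? (fun e => PySem.Str.isIn "CANONICAL" (fieldsB e).2.2) with _ | e <;>
          simp [hget]
      · simp only [h2, Bool.false_eq_true, if_false]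
        by_cases h3 : (mode == "worst") = true
        · simp only [h3, if_true]
          by_cases ha : worstKey a = 4
          · have hai : ((fieldsB a).1 == "intergenic_region") = true := (key_eq_four_iff a).1 ha
            have hFI : findIntergenicA (a :: rest) = some a := by
              simp only [findIntergenicA, fields_eq, hai, if_true]
            rw [hFI, pickMax_of_four rest a ha]
            simp [ha]
          · have hai : ((fieldsB a).1 == "intergenic_region") = false := by
              cases h : ((fieldsB a).1 == "intergenic_region")
              · rfl
              · exact absurd ((key_eq_four_iff a).2 h) ha
            have hFI : findIntergenicA (a :: rest) = findIntergenicA rest := by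
              simp only [findIntergenicA, fields_eq, hai, Bool.false_eq_true, if_false]
            have hstep : worstStepA (none, -1) a
                = ((if 0 ≤ worstKey a then some a else none), worstKey a) := by
              unfold worstStepA
              rw [fields_eq, rank_eq_key a ha]
              have := neg_one_le_key a
              by_cases h : 0 ≤ worstKey a
              · have h' : worstKey a > -1 := by omega
                simp [h', h]
              · have h1' : worstKey a = -1 := by omega
                simp [h1']
            simp only [List.foldl_cons, hstep]
            rw [← worst_loop rest a ha, hFI]
        · simp only [h3, Bool.false_eq_true, if_false]
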